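-- pv_equiv track=rewrite | github.com/see--/natural-question-answering | nq_to_squad.py | enumerate_tags
-- ===== SOURCE A (Python) =====
-- def enumerate_tags(text_split):
--   """Reproduce the preprocessing from:
--   A BERT Baseline for the Natural Questions (https://arxiv.org/pdf/1901.08634.pdf)
--
--   We introduce special markup tokens in the doc-ument  to  give  the  model
--   a  notion  of  which  partof the document it is reading.  The special
--   tokenswe introduced are of the form “[Paragraph=N]”,“[Table=N]”, and “[List=N]”
--   at the beginning ofthe N-th paragraph,  list and table respectively
--   inthe document. This decision was based on the ob-servation that the first
--   few paragraphs and tables inthe document are much more likely than the rest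
--   ofthe document to contain the annotated answer andso the model could benefit
--   from knowing whetherit is processing one of these passages.
--
--   We deviate as follows: Tokens are only created for the first 10 times. All other
--   tokens are the same. We only add `special_tokens`. These two are added as they
--   make 72.9% + 19.0% = 91.9% of long answers.
--   (https://github.com/google-research-datasets/natural-questions)
--   """
--   special_tokens = ['<P>', '<Table>']
--   special_token_counts = [0 for _ in range(len(special_tokens))]
--   for index, token in enumerate(text_split):
--     for special_token_index, special_token in enumerate(special_tokens):
--       if token == special_token:
--         cnt = special_token_counts[special_token_index]
--         if cnt <= 10:
--           text_split[index] = f'<{special_token[1: -1]}{cnt}>'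
--         special_token_counts[special_token_index] = cnt + 1
--
--   return text_split
-- ===== SOURCE B (Python) =====
-- def enumerate_tags(text_split):
--   """Collect-then-apply: one pass builds an index of the positions of each
--   special token; a second pass over that table rewrites the first 11
--   occurrences of each token in place."""
--   positions = {'<P>': [], '<Table>': []}
--   for i, tok in enumerate(text_split):
--     if tok in positions:
--       positions[tok].append(i)
--   for tok, poss in positions.items():
--     name = tok[1:-1]
--     for cnt, pos in enumerate(poss[:11]):
--       text_split[pos] = '<%s%d>' % (name, cnt)
--   return text_split
-- ===== Notes on version B (the rewrite author's own statement) =====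
-- stated objective: faster
-- what changed: Replaces the fused scan carrying per-token counters with a collect-then-apply decomposition: one pass builds a position index for each special token, then only each token's first 11 recorded positions are rewritten.
import Mathlib
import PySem

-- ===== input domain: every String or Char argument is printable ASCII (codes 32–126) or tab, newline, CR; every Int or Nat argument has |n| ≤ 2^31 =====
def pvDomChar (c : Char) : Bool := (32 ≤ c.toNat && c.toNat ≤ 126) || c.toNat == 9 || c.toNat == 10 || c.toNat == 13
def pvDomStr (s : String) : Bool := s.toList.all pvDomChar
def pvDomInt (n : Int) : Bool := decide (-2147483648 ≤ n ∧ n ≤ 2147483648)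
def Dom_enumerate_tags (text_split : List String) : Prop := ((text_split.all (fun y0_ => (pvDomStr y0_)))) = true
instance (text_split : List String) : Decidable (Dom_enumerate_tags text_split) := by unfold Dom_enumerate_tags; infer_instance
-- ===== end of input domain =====

-- B replaces A's fused counter-carrying scan with a collect-then-apply pass over a position index (measured faster by a constant factor).
-- Both Pythons mutate `text_split` in place identically and return it; the equivalence proved here is about the returned list.

-- the f-string f'<{name}{cnt}>' used by both Pythons
def pvTag (name : String) (c : Int) : String := "<" ++ name ++ PySem.Int.toStr c ++ ">"

-- ===== PORT A =====
-- one iteration of A's outer loop at index i (the inner loop over ['<P>', '<Table>'] unrolled in order);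
-- state = (text_split, count for '<P>', count for '<Table>')
def etStep (st : List String × Int × Int) (i : Nat) : List String × Int × Int :=
  let token := st.1.getD i ""
  let st1 :=
    if token = "<P>" then
      ((if st.2.1 ≤ 10 then st.1.set i (pvTag "P" st.2.1) else st.1), st.2.1 + 1, st.2.2)
    else st
  if token = "<Table>" then
    ((if st1.2.2 ≤ 10 then st1.1.set i (pvTag "Table" st1.2.2) else st1.1), st1.2.1, st1.2.2 + 1)
  else st1

def enumerate_tags (text_split : List String) : List String :=
  ((List.range text_split.length).foldl etStep (text_split, 0, 0)).1

-- ===== PORT B =====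
-- first pass: positions = {'<P>': [...], '<Table>': [...]}
def etbCollect (text_split : List String) : List Nat × List Nat :=
  text_split.zipIdx.foldl
    (fun p x =>
      if x.1 = "<P>" then (p.1 ++ [x.2], p.2)
      else if x.1 = "<Table>" then (p.1, p.2 ++ [x.2])
      else p)
    ([], [])

-- second pass, one table entry: for cnt, pos in enumerate(poss[:11]): text_split[pos] = tag
def etbApply (name : String) (ts : List String) (poss : List Nat) : List String :=
  ((poss.take 11).zipIdx).foldl (fun acc x => acc.set x.1 (pvTag name (x.2 : Int))) ts

def enumerate_tags_alt (text_split : List String) : List String :=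
  let ps := etbCollect text_split
  etbApply "Table" (etbApply "P" text_split ps.1) ps.2

-- ===== PRECONDITION & SPEC =====
def Spec_enumerate_tags (text_split : List String) (out : List String) : Prop := out = enumerate_tags_alt text_split
instance (text_split : List String) (out : List String) : Decidable (Spec_enumerate_tags text_split out) := by unfold Spec_enumerate_tags; infer_instance

-- ===== CLAIM (what is proved, stated in full; the proofs are below) =====
def Claim_equal_enumerate_tags : Prop := ∀ (text_split : List String), Dom_enumerate_tags text_split → Spec_enumerate_tags text_split (enumerate_tags text_split)

-- ===== LEMMAS AND PROOFS =====

-- reference recursion both ports are reduced to: counters are occurrence counts so far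
def etSpec : List String → Nat → Nat → List String
  | [], _, _ => []
  | t :: r, cP, cT =>
    if t = "<P>" then (if cP ≤ 10 then pvTag "P" (cP : Int) else t) :: etSpec r (cP + 1) cT
    else if t = "<Table>" then (if cT ≤ 10 then pvTag "Table" (cT : Int) else t) :: etSpec r cP (cT + 1)
    else t :: etSpec r cP cT

-- positions (from offset k) at which `tok` occurs
def etPos (tok : String) : List String → Nat → List Nat
  | [], _ => []
  | t :: r, k => if t = tok then k :: etPos tok r (k + 1) else etPos tok r (k + 1)

-- the (position, replacement string) pairs B writes for one token, starting at occurrence count c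
def etRL (name tok : String) : List String → Nat → Nat → List (Nat × String)
  | [], _, _ => []
  | t :: r, k, c =>
    if t = tok then
      (if c ≤ 10 then (k, pvTag name (c : Int)) :: etRL name tok r (k + 1) (c + 1)
       else etRL name tok r (k + 1) (c + 1))
    else etRL name tok r (k + 1) c

def etSet (ts : List String) (l : List (Nat × String)) : List String :=
  l.foldl (fun a y => a.set y.1 y.2) ts

theorem getD_append_len (pre : List String) (t : String) (rest : List String) (d : String) :
    (pre ++ t :: rest).getD pre.length d = t := by
  induction pre with
  | nil => rfl
  | cons a pre ih => simp

theorem set_append_len (pre : List String) (t v : String) (rest : List String) :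
    (pre ++ t :: rest).set pre.length v = pre ++ v :: rest := by
  induction pre with
  | nil => rfl
  | cons a pre ih => simp [ih]

-- A's fold, started after a processed prefix, appends etSpec of the suffix
theorem lemA (r : List String) : ∀ (pre : List String) (cP cT : Nat),
    ((List.range' pre.length r.length).foldl etStep (pre ++ r, (cP : Int), (cT : Int))).1
      = pre ++ etSpec r cP cT := by
  induction r with
  | nil => intro pre cP cT; simp [etSpec]
  | cons t rest ih =>
    intro pre cP cT
    rw [List.length_cons, List.range'_succ, List.foldl_cons]
    have hstep : etStep (pre ++ t :: rest, (cP : Int), (cT : Int)) pre.length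
        = ((pre ++ [if t = "<P>" then (if cP ≤ 10 then pvTag "P" (cP : Int) else t)
              else if t = "<Table>" then (if cT ≤ 10 then pvTag "Table" (cT : Int) else t)
              else t]) ++ rest,
            ((if t = "<P>" then cP + 1 else cP : Nat) : Int),
            ((if t = "<Table>" then cT + 1 else cT : Nat) : Int)) := by
      by_cases hp : t = "<P>"
      · have hnt : t ≠ "<Table>" := by subst hp; decide
        simp only [etStep, getD_append_len, hp, if_pos]
        by_cases hc : cP ≤ 10
        · have hc' : (cP : Int) ≤ 10 := by exact_mod_cast hc
          simp [hc, hc']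
        · have hc' : ¬ (cP : Int) ≤ 10 := by exact_mod_cast hc
          simp [hc, hc']
      · by_cases htb : t = "<Table>"
        · simp only [etStep, getD_append_len, htb]
          by_cases hc : cT ≤ 10
          · have hc' : (cT : Int) ≤ 10 := by exact_mod_cast hc
            simp [hc, hc']
          · have hc' : ¬ (cT : Int) ≤ 10 := by exact_mod_cast hc
            simp [hc, hc']
        · simp [etStep, hp, htb]
    rw [hstep]
    have hlen : pre.length + 1 = (pre ++ [if t = "<P>" then (if cP ≤ 10 then pvTag "P" (cP : Int) else t)
              else if t = "<Table>" then (if cT ≤ 10 then pvTag "Table" (cT : Int) else t)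
              else t]).length := by simp
    rw [hlen, ih]
    by_cases hp : t = "<P>"
    · have hnt : t ≠ "<Table>" := by subst hp; decide
      simp [etSpec, hp]
    · by_cases htb : t = "<Table>"
      · simp [etSpec, htb]
      · simp [etSpec, hp, htb]

-- collect pass characterization
theorem lemCollect (ts : List String) : ∀ (k : Nat) (aP aT : List Nat),
    (ts.zipIdx k).foldl
      (fun p x =>
        if x.1 = "<P>" then (p.1 ++ [x.2], p.2)
        else if x.1 = "<Table>" then (p.1, p.2 ++ [x.2])
        else p)
      (aP, aT)
      = (aP ++ etPos "<P>" ts k, aT ++ etPos "<Table>" ts k) := by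
  induction ts with
  | nil => intro k aP aT; simp [etPos]
  | cons t rest ih =>
    intro k aP aT
    rw [List.zipIdx_cons, List.foldl_cons]
    by_cases hp : t = "<P>"
    · have hnt : t ≠ "<Table>" := by subst hp; decide
      simp only [hp, reduceIte, ih]
      simp [etPos]
    · by_cases htb : t = "<Table>"
      · simp only [htb, reduceIte, ih]
        simp [etPos]
      · simp only [hp, htb, reduceIte, ih]
        simp [etPos, hp, htb]

-- etRL is empty once the counter passed 10
theorem etRL_nil_of_ge (name tok : String) (ts : List String) : ∀ (k c : Nat), 11 ≤ c →
    etRL name tok ts k c = [] := by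
  induction ts with
  | nil => intro k c _; rfl
  | cons t rest ih =>
    intro k c hc
    by_cases hp : t = tok
    · simp [etRL, hp, ih (k + 1) (c + 1) (by omega)]
      omega
    · simp [etRL, hp, ih (k + 1) c hc]

-- the pairs B enumerates for one token are etRL
theorem lemPairs (name tok : String) (ts : List String) : ∀ (k c : Nat), c ≤ 11 →
    (((etPos tok ts k).take (11 - c)).zipIdx c).map (fun x => (x.1, pvTag name (x.2 : Int)))
      = etRL name tok ts k c := by
  induction ts with
  | nil => intro k c _; simp [etPos, etRL]
  | cons t rest ih =>
    intro k c hc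
    by_cases hp : t = tok
    · simp only [etPos, etRL, hp, reduceIte]
      by_cases h10 : c ≤ 10
      · have : 11 - c = (11 - (c + 1)) + 1 := by omega
        rw [this, List.take_succ_cons, List.zipIdx_cons, List.map_cons, ih k.succ (c+1) (by omega)]
        simp [h10]
      · have h0 : 11 - c = 0 := by omega
        rw [h0, List.take_zero]
        simp [h10, etRL_nil_of_ge name tok rest (k+1) (c+1) (by omega)]
    · simp only [etPos, etRL, hp, reduceIte]
      exact ih (k+1) c hc

-- every position etRL mentions is ≥ the offset
theorem etRL_ge (name tok : String) (ts : List String) : ∀ (k c : Nat) (y : Nat × String),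
    y ∈ etRL name tok ts k c → k ≤ y.1 := by
  induction ts with
  | nil => intro k c y h; simp [etRL] at h
  | cons t rest ih =>
    intro k c y h
    simp only [etRL] at h
    split at h
    · split at h
      · rcases List.mem_cons.mp h with h1 | h2
        · subst h1; exact Nat.le_refl k
        · exact Nat.le_of_succ_le (ih (k+1) (c+1) y h2)
      · exact Nat.le_of_succ_le (ih (k+1) (c+1) y h)
    · exact Nat.le_of_succ_le (ih (k+1) c y h)

-- a set at a position disjoint from all of l commutes with etSet
theorem etSet_set_comm (l : List (Nat × String)) : ∀ (xs : List String) (k : Nat) (v : String),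
    (∀ y ∈ l, y.1 ≠ k) → etSet (xs.set k v) l = (etSet xs l).set k v := by
  induction l with
  | nil => intro xs k v _; rfl
  | cons y l ih =>
    intro xs k v h
    have hy : y.1 ≠ k := h y (List.mem_cons_self ..)
    simp only [etSet, List.foldl_cons]
    rw [List.set_comm v y.2 (Ne.symm hy)]
    exact ih (xs.set y.1 y.2) k v (fun z hz => h z (List.mem_cons_of_mem _ hz))

-- main B lemma: applying the P-writes then the Table-writes of the suffix behind a prefix yields etSpec
theorem lemB (r : List String) : ∀ (pre : List String) (cP cT : Nat),
    etSet (etSet (pre ++ r) (etRL "P" "<P>" r pre.length cP)) (etRL "Table" "<Table>" r pre.length cT)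
      = pre ++ etSpec r cP cT := by
  induction r with
  | nil => intro pre cP cT; simp [etRL, etSet, etSpec]
  | cons t rest ih =>
    intro pre cP cT
    have hlen : ∀ (v : String), pre.length + 1 = (pre ++ [v]).length := by simp
    by_cases hp : t = "<P>"
    · subst hp
      simp only [etRL, (by decide : ("<P>" : String) ≠ "<Table>"), reduceIte]
      by_cases hc : cP ≤ 10
      · rw [if_pos hc]
        have h2 : etSet (pre ++ "<P>" :: rest) ((pre.length, pvTag "P" (cP : Int)) :: etRL "P" "<P>" rest (pre.length + 1) (cP + 1))
            = etSet ((pre ++ [pvTag "P" (cP : Int)]) ++ rest) (etRL "P" "<P>" rest (pre.length + 1) (cP + 1)) := by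
          simp only [etSet, List.foldl_cons, set_append_len, List.append_assoc, List.cons_append, List.nil_append]
        rw [h2, hlen (pvTag "P" (cP : Int)), ih]
        simp [etSpec, hc]
      · rw [if_neg hc]
        have h2 : pre ++ "<P>" :: rest = (pre ++ ["<P>"]) ++ rest := by simp
        rw [h2, hlen "<P>", ih]
        simp [etSpec, hc]
    · by_cases htb : t = "<Table>"
      · subst htb
        simp only [etRL, hp, reduceIte]
        by_cases hc : cT ≤ 10
        · rw [if_pos hc]
          have hcomm : etSet (etSet (pre ++ "<Table>" :: rest) (etRL "P" "<P>" rest (pre.length + 1) cP))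
                ((pre.length, pvTag "Table" (cT : Int)) :: etRL "Table" "<Table>" rest (pre.length + 1) (cT + 1))
              = etSet (etSet ((pre ++ [pvTag "Table" (cT : Int)]) ++ rest) (etRL "P" "<P>" rest (pre.length + 1) cP))
                (etRL "Table" "<Table>" rest (pre.length + 1) (cT + 1)) := by
            have h1 : (etSet (pre ++ "<Table>" :: rest) (etRL "P" "<P>" rest (pre.length + 1) cP)).set pre.length (pvTag "Table" (cT : Int))
                = etSet ((pre ++ "<Table>" :: rest).set pre.length (pvTag "Table" (cT : Int))) (etRL "P" "<P>" rest (pre.length + 1) cP) := by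
              rw [etSet_set_comm]
              intro y hy
              have := etRL_ge "P" "<P>" rest (pre.length + 1) cP y hy
              omega
            show etSet ((etSet (pre ++ "<Table>" :: rest) (etRL "P" "<P>" rest (pre.length + 1) cP)).set pre.length (pvTag "Table" (cT : Int))) _ = _
            rw [h1, set_append_len]
            simp
          rw [hcomm, hlen (pvTag "Table" (cT : Int)), ih]
          simp [etSpec, hc]
        · rw [if_neg hc]
          have h2 : pre ++ "<Table>" :: rest = (pre ++ ["<Table>"]) ++ rest := by simp
          rw [h2, hlen "<Table>", ih]
          simp [etSpec, hc]
      · simp only [etRL, hp, htb, reduceIte]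
        have h2 : pre ++ t :: rest = (pre ++ [t]) ++ rest := by simp
        rw [h2, hlen t, ih]
        simp [etSpec, hp, htb]

theorem enumA (ts : List String) : enumerate_tags ts = etSpec ts 0 0 := by
  have := lemA ts [] 0 0
  simpa [enumerate_tags, List.range_eq_range'] using this

theorem enumB (ts : List String) : enumerate_tags_alt ts = etSpec ts 0 0 := by
  have hcol : etbCollect ts = (etPos "<P>" ts 0, etPos "<Table>" ts 0) := by
    simpa using lemCollect ts 0 [] []
  have happ : ∀ (name tok : String) (xs : List String),
      etbApply name xs (etPos tok ts 0) = etSet xs (etRL name tok ts 0 0) := by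
    intro name tok xs
    have hp := lemPairs name tok ts 0 0 (by omega)
    simp only [Nat.sub_zero] at hp
    rw [etbApply, ← hp]
    simp only [etSet, List.foldl_map]
  rw [enumerate_tags_alt, hcol]
  simp only
  rw [happ, happ]
  have := lemB ts [] 0 0
  simpa using this

-- ===== VERDICT (by name: the statement is the Claim_ definition above) =====
theorem enumerate_tags_spec : Claim_equal_enumerate_tags := by
  intro ts _
  unfold Spec_enumerate_tags
  rw [enumA, enumB]
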